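-- pv_equiv track=rewrite | github.com/isaacfink/aoc-2024 | day-10/solution.py | get_all_trails
-- ===== SOURCE A (Python) =====
-- dirs = [(-1, 0), (0, -1), (1, 0), (0, 1)]
--
-- def is_out_of_bounds(x: int, y: int, size: int):
--     return x < 0 or y < 0 or x >= size or y >= size
--
-- def get_trails(
--     dir: tuple[int, int],
--     current_number: int,
--     row: int,
--     col: int,
--     end_points: list[str],
--     map: list[list[int]],
-- ) -> list[str]:
--
--     new_row, new_col = (row + dir[0], col + dir[1])
--     if is_out_of_bounds(new_row, new_col, len(map)):
--         return end_points
--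
--     if map[new_row][new_col] == current_number + 1:
--         if current_number + 1 == 9:
--             return end_points + [f"{new_row}-{new_col}"]
--         return [
--             trails
--             for trails_list in [
--                 get_trails(x, current_number + 1, new_row, new_col, end_points, map)
--                 for x in dirs
--             ]
--             for trails in trails_list
--         ]
--
--     return end_points
--
-- def get_all_trails(map: list[list[int]]):
--     all_trails: list[list[str]] = []
--
--     for row_idx, row in enumerate(map):
--         for col_idx, col in enumerate(row):
--             if col == 0:
--                 all_trails.append(
--                     [
--                         trails
--                         for trails_list in [
--                             get_trails(x, 0, row_idx, col_idx, [], map) for x in dirs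
--                         ]
--                         for trails in trails_list
--                     ]
--                 )
--
--     return all_trails
-- ===== SOURCE B (Python) =====
-- dirs = [(-1, 0), (0, -1), (1, 0), (0, 1)]
--
-- def get_all_trails(map):
--     n = len(map)
--
--     def val(r, c):
--         if 0 <= r < n and 0 <= c < len(map[r]):
--             return map[r][c]
--         return None
--
--     # layer for value 9: each 9-cell is its own endpoint
--     grid = [[["%d-%d" % (r, c)] if val(r, c) == 9 else []
--              for c in range(n)] for r in range(n)]
--     # peel values 8 down to 1: a v-cell collects the lists of its (v+1)-neighbours
--     for v in range(8, 0, -1):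
--         grid = [[[e for dr, dc in dirs
--                   if 0 <= r + dr < n and 0 <= c + dc < n
--                   for e in grid[r + dr][c + dc]]
--                  if val(r, c) == v else []
--                  for c in range(n)]
--                 for r in range(n)]
--     out = []
--     for r, row in enumerate(map):
--         for c, x in enumerate(row):
--             if x == 0:
--                 out.append([e for dr, dc in dirs
--                             if 0 <= r + dr < n and 0 <= c + dc < n
--                             for e in grid[r + dr][c + dc]])
--     return out
-- ===== Notes on version B (the rewrite author's own statement) =====
-- stated objective: alternative
-- what changed: Replaces A's per-trailhead recursive DFS (which re-explores every trail suffix from scratch, worst-case exponential in the grid side) by a bottom-up dynamic program: one grid of per-cell endpoint-lists is built for value 9 and peeled down through values 8..1 in nine array passes, and each trailhead's answer is read off the value-1 layer.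
-- outside the precondition, e.g. on get_all_trails([[0, 2, 1], [2], [0, 2]]): A returns [[], []], B returns [[], []]
import Mathlib
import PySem

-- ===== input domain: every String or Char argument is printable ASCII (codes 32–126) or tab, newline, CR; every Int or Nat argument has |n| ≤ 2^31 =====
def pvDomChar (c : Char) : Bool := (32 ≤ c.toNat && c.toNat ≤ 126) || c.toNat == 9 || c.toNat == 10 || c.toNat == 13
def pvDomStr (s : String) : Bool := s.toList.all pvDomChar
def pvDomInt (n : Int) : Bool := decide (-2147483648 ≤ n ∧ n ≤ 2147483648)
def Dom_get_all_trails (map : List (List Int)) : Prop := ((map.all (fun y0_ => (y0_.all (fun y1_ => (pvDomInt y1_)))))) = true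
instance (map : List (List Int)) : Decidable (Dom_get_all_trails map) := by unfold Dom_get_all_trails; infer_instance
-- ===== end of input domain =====

-- B replaces A's per-trailhead exponential DFS (which re-explores every suffix of every
-- trail) by a single dynamic program over the value layers 9,8,…,1, then reads each
-- trailhead's answer off the value-1 layer; same return value, different algorithm.

-- ===== PORT A =====
def pvDirs : List (Int × Int) := [(-1, 0), (0, -1), (1, 0), (0, 1)]

def is_out_of_bounds (x y size : Int) : Bool :=
  decide (x < 0) || decide (y < 0) || decide (size ≤ x) || decide (size ≤ y)

-- fuel only makes the recursion structural: calls from get_all_trails start at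
-- current_number = 0 and recurse with current_number + 1, stopping at 9, so depth ≤ 9
-- and the fuel-0 branch is never reached from the entry point below.
def get_trails (fuel : Nat) (dir : Int × Int) (current_number row col : Int)
    (end_points : List String) (map : List (List Int)) : List String :=
  match fuel with
  | 0 => end_points
  | fuel + 1 =>
    let new_row := row + dir.1
    let new_col := col + dir.2
    if is_out_of_bounds new_row new_col (map.length : Int) then end_points
    else
      match PySem.List.pyGet? ((PySem.List.pyGet? map new_row).getD []) new_col with
      | none => end_points  -- Python raises IndexError here; such inputs are excluded by Pre_
      | some v =>
        if v = current_number + 1 then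
          if current_number + 1 = 9 then
            end_points ++ [PySem.Int.toStr new_row ++ "-" ++ PySem.Int.toStr new_col]
          else
            pvDirs.flatMap (fun x => get_trails fuel x (current_number + 1) new_row new_col end_points map)
        else end_points

def get_all_trails (map : List (List Int)) : List (List String) :=
  (PySem.List.enumerate map 0).foldl (fun all_trails p =>
    (PySem.List.enumerate p.2 0).foldl (fun all_trails q =>
      if q.2 = 0 then
        all_trails ++ [pvDirs.flatMap (fun x => get_trails 9 x 0 p.1 q.1 [] map)]
      else all_trails) all_trails) []

-- ===== PORT B =====
-- Source B's val(r, c): the guarded cell read (None outside the map)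
def pvVal? (map : List (List Int)) (r c : Int) : Option Int :=
  if 0 ≤ r ∧ 0 ≤ c then (map[r.toNat]?).bind (fun row => row[c.toNat]?) else none

-- Source B's bounded-neighbour comprehension: concat of grid cells at in-square neighbours
def pvNbrs (n : Nat) (grid : List (List (List String))) (r c : Int) : List String :=
  pvDirs.flatMap (fun d =>
    let nr := r + d.1
    let nc := c + d.2
    if 0 ≤ nr ∧ nr < (n : Int) ∧ 0 ≤ nc ∧ nc < (n : Int) then
      PySem.List.pyGetD (PySem.List.pyGetD grid nr []) nc []
    else [])

-- one pass of Source B's layer loop (value v)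
def pvStep (map : List (List Int)) (n : Nat) (grid : List (List (List String))) (v : Int) :
    List (List (List String)) :=
  (PySem.List.pyRange 0 (n : Int) 1).map (fun r =>
    (PySem.List.pyRange 0 (n : Int) 1).map (fun c =>
      if pvVal? map r c = some v then pvNbrs n grid r c else []))

def get_all_trails_alt (map : List (List Int)) : List (List String) :=
  let n := map.length
  let grid0 := (PySem.List.pyRange 0 (n : Int) 1).map (fun r =>
    (PySem.List.pyRange 0 (n : Int) 1).map (fun c =>
      if pvVal? map r c = some 9 then [PySem.Int.toStr r ++ "-" ++ PySem.Int.toStr c] else []))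
  let grid := (PySem.List.pyRange 8 0 (-1)).foldl (pvStep map n) grid0
  (PySem.List.enumerate map 0).foldl (fun out p =>
    (PySem.List.enumerate p.2 0).foldl (fun out q =>
      if q.2 = 0 then out ++ [pvNbrs n grid p.1 q.1] else out) out) []

-- ===== PRECONDITION & SPEC =====
-- Pre_ excludes ragged maps on which A's unguarded read map[r][c] can raise IndexError:
-- admitted are maps with no 0 cell (A never recurses) or maps where no in-square missing
-- cell has an adjacent cell that could be visited by A's exploration (value 0, or value
-- v in 1..8 with some adjacent cell valued v - 1, a necessary condition for being on a
-- 0,1,2,…-chain). It is a sound over-approximation: it also excludes some ragged maps on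
-- which A happens to return (see claim.json cites).
def Pre_get_all_trails (map : List (List Int)) : Prop :=
  (∀ row ∈ map, ∀ x ∈ row, x ≠ 0) ∨
  (∀ r ∈ List.range map.length, ∀ c ∈ List.range map.length,
    pvVal? map r c = none →
    ∀ d ∈ pvDirs,
      (pvVal? map ((r : Int) + d.1) ((c : Int) + d.2)).all
        (fun v => decide (v < 0 ∨ 8 < v) ||
          (decide (1 ≤ v) &&
            pvDirs.all (fun d' =>
              (pvVal? map ((r : Int) + d.1 + d'.1) ((c : Int) + d.2 + d'.2)).all
                (fun w => decide (w ≠ v - 1))))) = true)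
instance (map : List (List Int)) : Decidable (Pre_get_all_trails map) := by
  unfold Pre_get_all_trails; infer_instance

def pvWitness_get_all_trails : List (List Int) := [[0, 1], [2, 3]]

def Spec_get_all_trails (map : List (List Int)) (out : List (List String)) : Prop := out = get_all_trails_alt map
instance (map : List (List Int)) (out : List (List String)) : Decidable (Spec_get_all_trails map out) := by unfold Spec_get_all_trails; infer_instance

-- ===== CLAIM (what is proved, stated in full; the proofs are below) =====
def Claim_equal_get_all_trails : Prop := ∀ (map : List (List Int)), Dom_get_all_trails map → Pre_get_all_trails map → Spec_get_all_trails map (get_all_trails map)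

-- ===== LEMMAS AND PROOFS =====

-- the common value of both programs' per-cell trail lists: pvS map k r c is the list of
-- endpoint strings of strictly increasing trails that continue with value 9 - k from cell (r, c)
def pvS (map : List (List Int)) : Nat → Int → Int → List String
  | 0, r, c => [PySem.Int.toStr r ++ "-" ++ PySem.Int.toStr c]
  | k + 1, r, c => pvDirs.flatMap (fun d =>
      let nr := r + d.1
      let nc := c + d.2
      if (0 ≤ nr ∧ nr < (map.length : Int) ∧ 0 ≤ nc ∧ nc < (map.length : Int)) ∧
          pvVal? map nr nc = some (9 - (k : Int)) then pvS map k nr nc else [])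

-- the grid Source B holds after peeling down to value 9 - k
def pvLayer (map : List (List Int)) (k : Nat) : List (List (List String)) :=
  (PySem.List.pyRange 0 (map.length : Int) 1).map (fun r =>
    (PySem.List.pyRange 0 (map.length : Int) 1).map (fun c =>
      if pvVal? map r c = some (9 - (k : Int)) then pvS map k r c else []))

theorem pvNbrs_layer (map : List (List Int)) (k : Nat) (r c : Int) :
    pvNbrs map.length (pvLayer map k) r c = pvS map (k + 1) r c := by
  unfold pvNbrs pvS pvLayer
  congr 1
  funext d
  by_cases h : 0 ≤ r + d.1 ∧ r + d.1 < (map.length : Int) ∧ 0 ≤ c + d.2 ∧ c + d.2 < (map.length : Int)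
  · obtain ⟨h1, h2, h3, h4⟩ := h
    simp only [h1, h2, h3, h4, and_true, true_and, if_true]
    rw [PySem.List.pyGetD_map_pyRange_of_nonneg _ _ _ _ h1 h2,
        PySem.List.pyGetD_map_pyRange_of_nonneg _ _ _ _ h3 h4]
  · rw [if_neg h, if_neg (fun hc => h hc.1)]

theorem step_layer (map : List (List Int)) (k : Nat) :
    pvStep map map.length (pvLayer map k) (8 - (k : Int)) = pvLayer map (k + 1) := by
  unfold pvStep
  conv_rhs => rw [pvLayer]
  congr 1
  funext r
  congr 1
  funext c
  rw [pvNbrs_layer]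
  have : (9 : Int) - ((k : Nat) + 1 : Nat) = 8 - (k : Int) := by push_cast; ring
  rw [this]

theorem grid_eq_layer8 (map : List (List Int)) :
    (PySem.List.pyRange 8 0 (-1)).foldl (pvStep map map.length) (pvLayer map 0) =
      pvLayer map 8 := by
  have hr : PySem.List.pyRange 8 0 (-1) = [8, 7, 6, 5, 4, 3, 2, 1] := by decide
  rw [hr]
  show pvStep map map.length (pvStep map _ (pvStep map _ (pvStep map _ (pvStep map _
      (pvStep map _ (pvStep map _ (pvStep map _ (pvLayer map 0) 8) 7) 6) 5) 4) 3) 2) 1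
    = pvLayer map 8
  have h0 := step_layer map 0
  have h1 := step_layer map 1
  have h2 := step_layer map 2
  have h3 := step_layer map 3
  have h4 := step_layer map 4
  have h5 := step_layer map 5
  have h6 := step_layer map 6
  have h7 := step_layer map 7
  norm_num at h0 h1 h2 h3 h4 h5 h6 h7
  rw [h0, h1, h2, h3, h4, h5, h6, h7]

theorem read_eq_pvVal (map : List (List Int)) (nr nc : Int)
    (h1 : 0 ≤ nr) (h2 : nr < (map.length : Int)) (h3 : 0 ≤ nc) :
    PySem.List.pyGet? ((PySem.List.pyGet? map nr).getD []) nc = pvVal? map nr nc := by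
  unfold pvVal?
  rw [if_pos ⟨h1, h3⟩, PySem.List.pyGet?_of_nonneg map h1]
  have hlt : nr.toNat < map.length := by omega
  rw [List.getElem?_eq_getElem hlt]
  simp [PySem.List.pyGet?_of_nonneg _ h3]

theorem get_trails_eq_pvS (map : List (List Int)) (k : Nat) (hk : k ≤ 8) :
    ∀ (fuel : Nat), k < fuel → ∀ (d : Int × Int) (r c : Int),
      get_trails fuel d (8 - (k : Int)) r c [] map =
        (if (0 ≤ r + d.1 ∧ r + d.1 < (map.length : Int) ∧
             0 ≤ c + d.2 ∧ c + d.2 < (map.length : Int)) ∧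
            pvVal? map (r + d.1) (c + d.2) = some (9 - (k : Int)) then
          pvS map k (r + d.1) (c + d.2) else []) := by
  induction k with
  | zero =>
    intro fuel hf d r c
    obtain ⟨f, rfl⟩ : ∃ f, fuel = f + 1 := ⟨fuel - 1, by omega⟩
    simp only [get_trails]
    by_cases hb : 0 ≤ r + d.1 ∧ r + d.1 < (map.length : Int) ∧ 0 ≤ c + d.2 ∧ c + d.2 < (map.length : Int)
    · obtain ⟨h1, h2, h3, h4⟩ := hb
      have hoob : is_out_of_bounds (r + d.1) (c + d.2) (map.length : Int) = false := by
        unfold is_out_of_bounds; simp; omega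
      rw [hoob]
      simp only [Bool.false_eq_true, if_false]
      rw [read_eq_pvVal map _ _ h1 h2 h3]
      have e0 : (8 : Int) - ((0 : Nat) : Int) + 1 = 9 := by norm_num
      have e0' : (9 : Int) - ((0 : Nat) : Int) = 9 := by norm_num
      rw [e0, e0']
      cases hv : pvVal? map (r + d.1) (c + d.2) with
      | none => simp
      | some v =>
        dsimp only
        by_cases h9 : v = 9
        · subst h9
          rw [if_pos rfl, if_pos rfl, if_pos ⟨⟨h1, h2, h3, h4⟩, rfl⟩]
          rfl
        · rw [if_neg h9, if_neg (fun hcon => h9 (by injection hcon.2))]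
    · have hoob : is_out_of_bounds (r + d.1) (c + d.2) (map.length : Int) = true := by
        unfold is_out_of_bounds; simp; omega
      rw [hoob, if_pos rfl, if_neg (fun hcon => hb hcon.1)]
  | succ k ih =>
    intro fuel hf d r c
    obtain ⟨f, rfl⟩ : ∃ f, fuel = f + 1 := ⟨fuel - 1, by omega⟩
    simp only [get_trails]
    have e1 : (8 : Int) - ((k + 1 : Nat) : Int) + 1 = 8 - (k : Int) := by push_cast; ring
    have e2 : (9 : Int) - ((k + 1 : Nat) : Int) = 8 - (k : Int) := by push_cast; ring
    rw [e1, e2]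
    by_cases hb : 0 ≤ r + d.1 ∧ r + d.1 < (map.length : Int) ∧ 0 ≤ c + d.2 ∧ c + d.2 < (map.length : Int)
    · obtain ⟨h1, h2, h3, h4⟩ := hb
      have hoob : is_out_of_bounds (r + d.1) (c + d.2) (map.length : Int) = false := by
        unfold is_out_of_bounds; simp; omega
      rw [hoob]
      simp only [Bool.false_eq_true, if_false]
      rw [read_eq_pvVal map _ _ h1 h2 h3]
      cases hv : pvVal? map (r + d.1) (c + d.2) with
      | none => simp
      | some v =>
        dsimp only
        by_cases hval : v = 8 - (k : Int)
        · subst hval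
          have h9 : ¬((8 : Int) - (k : Int) = 9) := by omega
          rw [if_pos rfl, if_neg h9, if_pos ⟨⟨h1, h2, h3, h4⟩, rfl⟩]
          conv_rhs => rw [pvS]
          congr 1
          funext x
          have := ih (by omega) f (by omega) x (r + d.1) (c + d.2)
          simpa using this
        · rw [if_neg hval, if_neg (fun hcon => hval (by injection hcon.2))]
    · have hoob : is_out_of_bounds (r + d.1) (c + d.2) (map.length : Int) = true := by
        unfold is_out_of_bounds; simp; omega
      rw [hoob, if_pos rfl, if_neg (fun hcon => hb hcon.1)]

theorem ports_eq (map : List (List Int)) :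
    get_all_trails map = get_all_trails_alt map := by
  unfold get_all_trails get_all_trails_alt
  dsimp only
  have hg0 : ((PySem.List.pyRange 0 (map.length : Int) 1).map (fun r =>
      (PySem.List.pyRange 0 (map.length : Int) 1).map (fun c =>
        if pvVal? map r c = some 9 then [PySem.Int.toStr r ++ "-" ++ PySem.Int.toStr c] else []))) = pvLayer map 0 := by
    unfold pvLayer
    norm_num
    intro a _ _ b _ _
    split_ifs <;> rfl
  rw [hg0, grid_eq_layer8]
  have helt : ∀ ri ci : Int,
      pvDirs.flatMap (fun x => get_trails 9 x 0 ri ci [] map) =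
        pvNbrs map.length (pvLayer map 8) ri ci := by
    intro ri ci
    rw [pvNbrs_layer map 8 ri ci]
    conv_rhs => rw [pvS]
    congr 1
    funext x
    have := get_trails_eq_pvS map 8 (by omega) 9 (by omega) x ri ci
    norm_num at this ⊢
    exact this
  congr 1
  funext out p
  congr 1
  funext out' q
  by_cases hq : q.2 = 0
  · rw [if_pos hq, if_pos hq, helt p.1 q.1]
  · rw [if_neg hq, if_neg hq]

-- ===== VERDICT (by name: the statement is the Claim_ definition above) =====
theorem get_all_trails_spec : Claim_equal_get_all_trails := by
  intro map _ _
  exact ports_eq map
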